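-- pv_equiv track=rewrite | github.com/washingmg/The-Huxley | Médio/ex08.py | zeca
-- ===== SOURCE A (Python) =====
-- def zeca(V, N, total_recebidos):
--     total_recebidos.sort()
--     for i in range(N - 2):
--         for j in range(i + 1, N - 1):
--             for k in range(j + 1, N):
--                 if sum(total_recebidos[i:k+1]) == V:
--                     return "Zeca nao vai ter que trabalhar!"
--     return "Zeca vai ter que trabalhar."
-- ===== SOURCE B (Python) =====
-- def zeca(V, N, total_recebidos):
--     # Sort once, build prefix sums, then check every window [i, k] with k - i >= 2
--     # directly: O(N^2) instead of three nested loops with per-window slice sums.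
--     total_recebidos.sort()
--     prefix = [0]
--     for x in total_recebidos:
--         prefix.append(prefix[-1] + x)
--     for i in range(N - 2):
--         for k in range(i + 2, N):
--             if prefix[k + 1] - prefix[i] == V:
--                 return "Zeca nao vai ter que trabalhar!"
--     return "Zeca vai ter que trabalhar."
-- ===== Notes on version B (the rewrite author's own statement) =====
-- stated objective: faster
-- what changed: B sorts once, builds a prefix-sum array and checks each window (i,k) with k>=i+2 directly, dropping A's redundant middle j loop and its per-window slice summation; Pre_ excludes N > len(total_recebidos), where A's slices silently clamp (even summing empty or short windows) while B's prefix-sum indexing raises IndexError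
-- outside the precondition, e.g. on zeca(0, 3, []): A returns 'Zeca nao vai ter que trabalhar!', B raises IndexError; on zeca(5, 4, [5]): A returns 'Zeca nao vai ter que trabalhar!', B raises IndexError
import Mathlib
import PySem

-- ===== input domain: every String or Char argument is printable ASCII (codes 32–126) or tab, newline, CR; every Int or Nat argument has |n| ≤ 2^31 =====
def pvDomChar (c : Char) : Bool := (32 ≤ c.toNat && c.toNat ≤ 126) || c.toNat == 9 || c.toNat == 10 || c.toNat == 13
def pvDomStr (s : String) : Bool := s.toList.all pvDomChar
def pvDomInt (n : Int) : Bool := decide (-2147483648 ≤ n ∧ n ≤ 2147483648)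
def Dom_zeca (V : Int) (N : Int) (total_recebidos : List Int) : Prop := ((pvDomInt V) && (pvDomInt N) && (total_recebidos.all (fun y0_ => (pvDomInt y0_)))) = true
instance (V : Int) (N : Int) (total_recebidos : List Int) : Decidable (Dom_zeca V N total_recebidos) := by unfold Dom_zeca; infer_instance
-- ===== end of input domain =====

-- B replaces A's O(N^4) triple loop + slice sums with one prefix-sum array and an O(N^2)
-- scan over (i,k) windows (A's j loop is redundant).  Both Pythons sort the list in place;
-- the equivalence proved here is about the RETURN value (the mutation is identical anyway).

-- ===== PORT A =====
def zeca (V : Int) (N : Int) (total_recebidos : List Int) : String :=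
  let tr := PySem.List.sorted total_recebidos id false
  if (PySem.List.pyRange 0 (N - 2) 1).any (fun i =>
       (PySem.List.pyRange (i + 1) (N - 1) 1).any (fun j =>
         (PySem.List.pyRange (j + 1) N 1).any (fun k =>
           decide ((PySem.List.slice tr (some i) (some (k + 1))).sum = V))))
  then "Zeca nao vai ter que trabalhar!"
  else "Zeca vai ter que trabalhar."

-- ===== PORT B =====
-- prefix[-1] is PySem.List.pyGetD … (-1) 0; prefix[i] / prefix[k+1] are pyGetD with default 0
-- (under Pre_ every index is in range, so the default is never used).
def zeca_alt (V : Int) (N : Int) (total_recebidos : List Int) : String :=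
  let tr := PySem.List.sorted total_recebidos id false
  let pre : List Int := tr.foldl (fun p x => p ++ [PySem.List.pyGetD p (-1) 0 + x]) [0]
  if (PySem.List.pyRange 0 (N - 2) 1).any (fun i =>
       (PySem.List.pyRange (i + 2) N 1).any (fun k =>
         decide (PySem.List.pyGetD pre (k + 1) 0 - PySem.List.pyGetD pre i 0 = V)))
  then "Zeca nao vai ter que trabalhar!"
  else "Zeca vai ter que trabalhar."

-- ===== PRECONDITION & SPEC =====
-- Pre_ excludes N > len(total_recebidos): there A's slices silently clamp (summing truncated
-- or even empty windows) while B's prefix-sum indexing raises IndexError.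
def Pre_zeca (V : Int) (N : Int) (total_recebidos : List Int) : Prop :=
  N ≤ (total_recebidos.length : Int)
instance (V : Int) (N : Int) (total_recebidos : List Int) : Decidable (Pre_zeca V N total_recebidos) := by unfold Pre_zeca; infer_instance
def pvWitness_zeca : Int × Int × List Int := (3, 3, [1, 1, 1])
def Spec_zeca (V : Int) (N : Int) (total_recebidos : List Int) (out : String) : Prop := out = zeca_alt V N total_recebidos
instance (V : Int) (N : Int) (total_recebidos : List Int) (out : String) : Decidable (Spec_zeca V N total_recebidos out) := by unfold Spec_zeca; infer_instance

-- ===== CLAIM (what is proved, stated in full; the proofs are below) =====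
def Claim_equal_zeca : Prop := ∀ (V : Int) (N : Int) (total_recebidos : List Int), Dom_zeca V N total_recebidos → Pre_zeca V N total_recebidos → Spec_zeca V N total_recebidos (zeca V N total_recebidos)

-- ===== LEMMAS AND PROOFS =====

lemma pvAnyCongrMem {α : Type} (l : List α) (f g : α → Bool)
    (h : ∀ a ∈ l, f a = g a) : l.any f = l.any g := by
  induction l with
  | nil => rfl
  | cons x xs ih =>
      simp only [List.any_cons, h x (List.mem_cons_self ..),
        ih (fun a ha => h a (List.mem_cons_of_mem _ ha))]

-- A's middle loop over j is redundant: the union of k-ranges is [i+2, N).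
lemma pvCollapseJ (i N : Int) (C : Int → Bool) :
    ((PySem.List.pyRange (i + 1) (N - 1) 1).any (fun j =>
      (PySem.List.pyRange (j + 1) N 1).any (fun k => C k)))
    = (PySem.List.pyRange (i + 2) N 1).any C := by
  rw [Bool.eq_iff_iff]
  simp only [List.any_eq_true, PySem.List.mem_pyRange_one]
  constructor
  · rintro ⟨j, ⟨hj1, hj2⟩, k, ⟨hk1, hk2⟩, hC⟩
    exact ⟨k, ⟨by omega, hk2⟩, hC⟩
  · rintro ⟨k, ⟨hk1, hk2⟩, hC⟩
    exact ⟨k - 1, ⟨by omega, by omega⟩, k, ⟨by omega, hk2⟩, hC⟩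

lemma pvSumDropTake (xs : List Int) (a b : Nat) :
    ((xs.drop a).take b).sum = (xs.take (a + b)).sum - (xs.take a).sum := by
  rw [List.take_add, List.sum_append]; ring

-- the prefix-sum loop of B, characterised: starting from q ++ [s] it appends the running sums
lemma pvPrefAux (xs : List Int) (s : Int) (q : List Int) :
    (xs.foldl (fun p x => p ++ [PySem.List.pyGetD p (-1) 0 + x]) (q ++ [s]))
    = (q ++ [s]) ++ (List.range xs.length).map (fun m => s + (xs.take (m + 1)).sum) := by
  induction xs generalizing s q with
  | nil => simp
  | cons x xs ih =>
      simp only [List.foldl_cons, PySem.List.pyGetD_neg_one_append_singleton]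
      rw [ih (s + x) (q ++ [s])]
      simp only [List.length_cons, List.range_succ_eq_map, List.map_cons, List.map_map,
        List.append_assoc, List.singleton_append]
      refine congrArg (fun t => q ++ t) ?_
      refine congrArg (fun t => s :: t) ?_
      apply List.cons_eq_cons.mpr
      refine ⟨by simp, ?_⟩
      apply List.map_congr_left
      intro a _
      simp [Function.comp, List.take_succ_cons]
      ring

lemma pvPrefGet (xs : List Int) (i : Int) (hi : 0 ≤ i) (hle : i ≤ (xs.length : Int)) :
    PySem.List.pyGetD
      (xs.foldl (fun p x => p ++ [PySem.List.pyGetD p (-1) 0 + x]) [0]) i 0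
    = (xs.take i.toNat).sum := by
  have h0 : ([0] : List Int) = [] ++ [0] := rfl
  rw [h0, pvPrefAux xs 0 []]
  simp only [List.nil_append, zero_add]
  have hcast : i = ((i.toNat : Nat) : Int) := by omega
  rw [hcast, PySem.List.pyGetD_natCast, Int.toNat_natCast]
  rw [List.getD_eq_getElem _ _ (by simp; omega)]
  rcases Nat.eq_zero_or_pos i.toNat with h | hpos
  · simp [h]
  · rw [List.getElem_append_right (by simp; omega)]
    simp only [List.length_cons, List.length_nil, List.getElem_map, List.getElem_range]
    have h1 : i.toNat - 1 + 1 = i.toNat := by omega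
    rw [h1]

lemma pvSliceEq (xs : List Int) (i k : Int) (hi : 0 ≤ i) (hik : i ≤ k + 1) :
    (PySem.List.slice xs (some i) (some (k + 1))).sum
    = (xs.take (k + 1).toNat).sum - (xs.take i.toNat).sum := by
  rw [PySem.List.slice_toNat xs hi (by omega)]
  have h := pvSumDropTake xs i.toNat ((k + 1).toNat - i.toNat)
  have heq : i.toNat + ((k + 1).toNat - i.toNat) = (k + 1).toNat := by omega
  rw [heq] at h
  exact h

lemma pvCondEq (V N : Int) (tr : List Int) (hNL : N ≤ (tr.length : Int)) :
    ((PySem.List.pyRange 0 (N - 2) 1).any (fun i =>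
       (PySem.List.pyRange (i + 1) (N - 1) 1).any (fun j =>
         (PySem.List.pyRange (j + 1) N 1).any (fun k =>
           decide ((PySem.List.slice tr (some i) (some (k + 1))).sum = V)))))
    = ((PySem.List.pyRange 0 (N - 2) 1).any (fun i =>
       (PySem.List.pyRange (i + 2) N 1).any (fun k =>
         decide (PySem.List.pyGetD
             (tr.foldl (fun p x => p ++ [PySem.List.pyGetD p (-1) 0 + x]) [0]) (k + 1) 0
           - PySem.List.pyGetD
             (tr.foldl (fun p x => p ++ [PySem.List.pyGetD p (-1) 0 + x]) [0]) i 0 = V)))) := by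
  apply Eq.trans (pvAnyCongrMem _ _ _ (fun i hi => pvCollapseJ i N _))
  apply pvAnyCongrMem
  intro i hi
  rw [PySem.List.mem_pyRange_one] at hi
  apply pvAnyCongrMem
  intro k hk
  rw [PySem.List.mem_pyRange_one] at hk
  rw [pvPrefGet tr i hi.1 (by omega), pvPrefGet tr (k + 1) (by omega) (by omega),
    pvSliceEq tr i k hi.1 (by omega)]

-- ===== VERDICT (by name: the statement is the Claim_ definition above) =====
theorem zeca_spec : Claim_equal_zeca := by
  intro V N tr0 _ hpre
  show zeca V N tr0 = zeca_alt V N tr0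
  have hlen : ((PySem.List.sorted tr0 id false).length : Int) = (tr0.length : Int) := by
    rw [PySem.List.length_sorted]
  have h := pvCondEq V N (PySem.List.sorted tr0 id false) (by rw [hlen]; exact hpre)
  simp only [zeca, zeca_alt, h]
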